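-- pv_equiv track=rewrite | github.com/MinTreesLearn/ML | Codeforces Submissions/1313/C2/153529698.py | helper
-- ===== SOURCE A (Python) =====
-- from collections import deque
--
-- def helper(arr, n):
--
--     l = [0 for _ in range(n)]
--
--     stk = deque()
--
--     for i in range(n):
--
--         while len(stk) and arr[stk[-1]] >= arr[i]:
--
--             stk.pop()
--
--         if len(stk) == 0:
--
--             l[i] = (i+1)*arr[i]
--
--         else:
--
--             j = stk[-1]
--
--             l[i] = (((i-j))*arr[i])+l[j]
--
--         stk.append(i)
--
--     return l
-- ===== SOURCE B (Python) =====
-- def helper(arr, n):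
--     # For each i, l[i] = sum over k in [0,i] of min(arr[k..i]),
--     # computed by a backward scan with a running minimum (no stack).
--     out = []
--     for i in range(n):
--         m = arr[i]
--         s = 0
--         for k in range(i, -1, -1):
--             if arr[k] < m:
--                 m = arr[k]
--             s += m
--         out.append(s)
--     return out
-- ===== Notes on version B (the rewrite author's own statement) =====
-- stated objective: simpler
-- what changed: Replaces the monotonic stack and index-DP recurrence l[i]=(i-j)*arr[i]+l[j] by a direct backward scan per i that accumulates a running minimum, computing l[i] = sum of min(arr[k..i]) for k in [0,i] with no stack and no stored DP table.
import Mathlib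
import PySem

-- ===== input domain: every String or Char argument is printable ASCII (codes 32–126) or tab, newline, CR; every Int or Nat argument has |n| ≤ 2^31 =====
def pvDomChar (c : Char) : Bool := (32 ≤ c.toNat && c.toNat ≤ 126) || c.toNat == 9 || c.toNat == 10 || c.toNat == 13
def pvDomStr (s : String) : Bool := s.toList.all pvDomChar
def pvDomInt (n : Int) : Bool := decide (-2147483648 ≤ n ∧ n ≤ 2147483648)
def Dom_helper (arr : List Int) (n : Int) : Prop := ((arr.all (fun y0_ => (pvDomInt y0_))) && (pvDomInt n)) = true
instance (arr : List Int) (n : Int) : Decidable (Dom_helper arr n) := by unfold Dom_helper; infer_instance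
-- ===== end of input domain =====

-- B drops A's monotonic stack and DP table: it computes each l[i] by a backward scan
-- with a running minimum (objective: simpler; B is O(n^2) vs A's O(n)).

-- ===== PORT A =====
-- the `while len(stk) and arr[stk[-1]] >= arr[i]: stk.pop()` loop; stack top at head.
-- Pre_helper guarantees every index is in range, so List.getD is exact for Python's arr[.], l[.].
def popLoop (arr : List Int) (x : Int) : List Nat → List Nat
  | [] => []
  | j :: rest => if x ≤ arr.getD j 0 then popLoop arr x rest else j :: rest

-- one iteration of `for i in range(n)`: state = (l, stk)
def helperStep (arr : List Int) (st : List Int × List Nat) (i : Nat) : List Int × List Nat :=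
  let stk := popLoop arr (arr.getD i 0) st.2
  match stk with
  | [] => (st.1.set i (((i : Int) + 1) * arr.getD i 0), i :: stk)
  | j :: _ => (st.1.set i (((i : Int) - (j : Int)) * arr.getD i 0 + st.1.getD j 0), i :: stk)

def helper (arr : List Int) (n : Int) : List Int :=
  ((List.range n.toNat).foldl (helperStep arr) (List.replicate n.toNat 0, ([] : List Nat))).1

-- ===== PORT B =====
-- body of `for k in range(i, -1, -1)`: state = (m, s)
def scanStep (arr : List Int) (p : Int × Int) (k : Nat) : Int × Int :=
  let m := if arr.getD k 0 < p.1 then arr.getD k 0 else p.1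
  (m, p.2 + m)

-- the inner backward scan: range(i, -1, -1) = [i, i-1, ..., 0]
def minScan (arr : List Int) (i : Nat) : Int :=
  ((List.range (i + 1)).reverse.foldl (scanStep arr) (arr.getD i 0, 0)).2

def helper_alt (arr : List Int) (n : Int) : List Int :=
  (List.range n.toNat).map (minScan arr)

-- ===== PRECONDITION & SPEC =====
-- Pre_ excludes exactly n > len(arr), on which Python A raises IndexError (arr[i] with i ≥ len(arr)).
def Pre_helper (arr : List Int) (n : Int) : Prop := n ≤ (arr.length : Int)
instance (arr : List Int) (n : Int) : Decidable (Pre_helper arr n) := by unfold Pre_helper; infer_instance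
def pvWitness_helper : List Int × Int := ([1, -2, 2], 3)

def Spec_helper (arr : List Int) (n : Int) (out : List Int) : Prop := out = helper_alt arr n
instance (arr : List Int) (n : Int) (out : List Int) : Decidable (Spec_helper arr n out) := by unfold Spec_helper; infer_instance

-- ===== CLAIM (what is proved, stated in full; the proofs are below) =====
def Claim_equal_helper : Prop := ∀ (arr : List Int) (n : Int), Dom_helper arr n → Pre_helper arr n → Spec_helper arr n (helper arr n)

-- ===== LEMMAS AND PROOFS =====

-- index of the nearest previous element strictly smaller than v, searching down from k-1
def searchDown (arr : List Int) (v : Int) : Nat → Option Nat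
  | 0 => none
  | k + 1 => if arr.getD k 0 < v then some k else searchDown arr v k

def prevLess (arr : List Int) (i : Nat) : Option Nat := searchDown arr (arr.getD i 0) i

-- the chain of previous-smaller indices starting at i (fuel-indexed)
def chainA (arr : List Int) : Nat → Nat → List Nat
  | 0, i => [i]
  | fuel + 1, i => i :: (match prevLess arr i with | none => [] | some j => chainA arr fuel j)

def chain (arr : List Int) (i : Nat) : List Nat := chainA arr i i

-- the value A stores in l[i] (fuel-indexed recursion along prevLess)
def fA (arr : List Int) : Nat → Nat → Int
  | 0, i => ((i : Int) + 1) * arr.getD i 0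
  | fuel + 1, i =>
    match prevLess arr i with
    | none => ((i : Int) + 1) * arr.getD i 0
    | some j => ((i : Int) - (j : Int)) * arr.getD i 0 + fA arr fuel j

def fval (arr : List Int) (i : Nat) : Int := fA arr i i

-- tail of the chain
def chainTail (arr : List Int) (i : Nat) : List Nat :=
  match prevLess arr i with | none => [] | some j => chain arr j

-- the stack A holds at the start of iteration t
def stkOf (arr : List Int) : Nat → List Nat
  | 0 => []
  | t + 1 => chain arr t

-- what the pop loop leaves on the stack at iteration t
def popRes (arr : List Int) (t : Nat) : List Nat :=
  match prevLess arr t with | none => [] | some j => chain arr j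

theorem searchDown_lt {arr : List Int} {v : Int} {k j : Nat}
    (h : searchDown arr v k = some j) : j < k := by
  induction k with
  | zero => simp [searchDown] at h
  | succ k ih =>
    simp only [searchDown] at h
    split_ifs at h with hc
    · cases h; omega
    · have := ih h; omega

theorem searchDown_some_lt {arr : List Int} {v : Int} {k j : Nat}
    (h : searchDown arr v k = some j) : arr.getD j 0 < v := by
  induction k with
  | zero => simp [searchDown] at h
  | succ k ih =>
    simp only [searchDown] at h
    split_ifs at h with hc
    · cases h; exact hc
    · exact ih h

theorem searchDown_between {arr : List Int} {v : Int} {k j : Nat}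
    (h : searchDown arr v k = some j) : ∀ m, j < m → m < k → ¬ arr.getD m 0 < v := by
  induction k with
  | zero => simp [searchDown] at h
  | succ k ih =>
    simp only [searchDown] at h
    split_ifs at h with hc
    · cases h; intro m h1 h2; omega
    · intro m h1 h2
      rcases Nat.lt_succ_iff_lt_or_eq.mp h2 with h2' | h2'
      · exact ih h m h1 h2'
      · subst h2'; exact hc

theorem searchDown_none {arr : List Int} {v : Int} {k : Nat}
    (h : searchDown arr v k = none) : ∀ m, m < k → ¬ arr.getD m 0 < v := by
  induction k with
  | zero => intro m hm; omega
  | succ k ih =>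
    simp only [searchDown] at h
    split_ifs at h with hc
    · intro m hm
      rcases Nat.lt_succ_iff_lt_or_eq.mp hm with h' | h'
      · exact ih h m h'
      · subst h'; exact hc

theorem searchDown_complete_none {arr : List Int} {v : Int} {k : Nat}
    (h : ∀ m, m < k → ¬ arr.getD m 0 < v) : searchDown arr v k = none := by
  induction k with
  | zero => rfl
  | succ k ih =>
    simp only [searchDown]
    rw [if_neg (h k (Nat.lt_succ_self k))]
    exact ih (fun m hm => h m (Nat.lt_succ_of_lt hm))

theorem searchDown_complete_some {arr : List Int} {v : Int} {k j : Nat}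
    (hjk : j < k) (hj : arr.getD j 0 < v)
    (h : ∀ m, j < m → m < k → ¬ arr.getD m 0 < v) : searchDown arr v k = some j := by
  induction k with
  | zero => omega
  | succ k ih =>
    simp only [searchDown]
    by_cases hk : j = k
    · subst hk; rw [if_pos hj]
    · rw [if_neg (h k (by omega) (Nat.lt_succ_self k))]
      exact ih (by omega) (fun m h1 h2 => h m h1 (Nat.lt_succ_of_lt h2))

theorem prevLess_zero (arr : List Int) : prevLess arr 0 = none := rfl

theorem chainA_irrel {arr : List Int} : ∀ i f1 f2, i ≤ f1 → i ≤ f2 →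
    chainA arr f1 i = chainA arr f2 i := by
  intro i
  induction i using Nat.strong_induction_on with
  | _ i ih =>
    intro f1 f2 h1 h2
    match i, f1, f2 with
    | 0, 0, 0 => rfl
    | 0, 0, f2 + 1 => simp [chainA, prevLess, searchDown]
    | 0, f1 + 1, 0 => simp [chainA, prevLess, searchDown]
    | 0, f1 + 1, f2 + 1 => simp [chainA, prevLess, searchDown]
    | i + 1, f1 + 1, f2 + 1 =>
      simp only [chainA]
      rcases h : prevLess arr (i + 1) with _ | j
      · rfl
      · have hj : j < i + 1 := searchDown_lt h
        show (i + 1) :: chainA arr f1 j = (i + 1) :: chainA arr f2 j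
        rw [ih j hj f1 f2 (by omega) (by omega)]

theorem chain_eq_none {arr : List Int} {i : Nat} (h : prevLess arr i = none) :
    chain arr i = [i] := by
  unfold chain
  match i with
  | 0 => rfl
  | t + 1 => simp only [chainA]; rw [h]

theorem chain_eq_some {arr : List Int} {i j : Nat} (h : prevLess arr i = some j) :
    chain arr i = i :: chain arr j := by
  have hj : j < i := searchDown_lt h
  unfold chain
  match i with
  | 0 => omega
  | t + 1 =>
    simp only [chainA]
    rw [h]
    show (t + 1) :: chainA arr t j = (t + 1) :: chainA arr j j
    rw [chainA_irrel j t j (by omega) (le_refl j)]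

theorem fA_irrel {arr : List Int} : ∀ i f1 f2, i ≤ f1 → i ≤ f2 →
    fA arr f1 i = fA arr f2 i := by
  intro i
  induction i using Nat.strong_induction_on with
  | _ i ih =>
    intro f1 f2 h1 h2
    match i, f1, f2 with
    | 0, 0, 0 => rfl
    | 0, 0, f2 + 1 => simp [fA, prevLess, searchDown]
    | 0, f1 + 1, 0 => simp [fA, prevLess, searchDown]
    | 0, f1 + 1, f2 + 1 => simp [fA, prevLess, searchDown]
    | i + 1, f1 + 1, f2 + 1 =>
      simp only [fA]
      rcases h : prevLess arr (i + 1) with _ | j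
      · rfl
      · have hj : j < i + 1 := searchDown_lt h
        show (↑(i + 1) - ↑j) * arr.getD (i + 1) 0 + fA arr f1 j
          = (↑(i + 1) - ↑j) * arr.getD (i + 1) 0 + fA arr f2 j
        rw [ih j hj f1 f2 (by omega) (by omega)]

theorem fval_eq_none {arr : List Int} {i : Nat} (h : prevLess arr i = none) :
    fval arr i = ((i : Int) + 1) * arr.getD i 0 := by
  unfold fval
  match i with
  | 0 => rfl
  | t + 1 => simp only [fA]; rw [h]

theorem fval_eq_some {arr : List Int} {i j : Nat} (h : prevLess arr i = some j) :
    fval arr i = ((i : Int) - (j : Int)) * arr.getD i 0 + fval arr j := by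
  have hj : j < i := searchDown_lt h
  unfold fval
  match i with
  | 0 => omega
  | t + 1 =>
    simp only [fA]
    rw [h]
    show (↑(t + 1) - ↑j) * arr.getD (t + 1) 0 + fA arr t j
      = (↑(t + 1) - ↑j) * arr.getD (t + 1) 0 + fA arr j j
    rw [fA_irrel j t j (by omega) (le_refl j)]

theorem chain_cons (arr : List Int) (i : Nat) : chain arr i = i :: chainTail arr i := by
  rcases h : prevLess arr i with _ | j
  · rw [chain_eq_none h]; unfold chainTail; rw [h]
  · rw [chain_eq_some h]; unfold chainTail; rw [h]

theorem popRes_none {arr : List Int} {t : Nat} (h : prevLess arr t = none) :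
    popRes arr t = [] := by unfold popRes; rw [h]

theorem popRes_some {arr : List Int} {t j : Nat} (h : prevLess arr t = some j) :
    popRes arr t = chain arr j := by unfold popRes; rw [h]

theorem popChain {arr : List Int} {t : Nat} : ∀ i, i < t →
    (∀ k, i < k → k < t → arr.getD t 0 ≤ arr.getD k 0) →
    popLoop arr (arr.getD t 0) (chain arr i) = popRes arr t := by
  intro i
  induction i using Nat.strong_induction_on with
  | _ i ih =>
    intro hit hyp
    rcases hpl : prevLess arr i with _ | j
    · rw [chain_eq_none hpl]
      simp only [popLoop]
      split_ifs with hc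
      · -- popped i; stack empty, prevLess t = none
        rw [popRes_none]
        unfold prevLess
        apply searchDown_complete_none
        intro m hm
        rcases Nat.lt_trichotomy m i with h' | h' | h'
        · have := searchDown_none hpl m h'
          intro hlt; exact this (lt_of_lt_of_le hlt hc)
        · subst h'; exact not_lt.mpr hc
        · exact not_lt.mpr (hyp m h' hm)
      · -- arr[i] < arr[t] : stop, top = i, prevLess t = some i
        rw [not_le] at hc
        rw [popRes_some (searchDown_complete_some hit hc
          (fun m h1 h2 => not_lt.mpr (hyp m h1 h2)))]
        rw [chain_eq_none hpl]
    · rw [chain_eq_some hpl]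
      simp only [popLoop]
      split_ifs with hc
      · -- popped i; continue along chain arr j
        have hj : j < i := searchDown_lt hpl
        apply ih j hj (by omega)
        intro k h1 h2
        rcases Nat.lt_trichotomy k i with h' | h' | h'
        · exact le_trans hc (not_lt.mp (searchDown_between hpl k h1 h'))
        · subst h'; exact hc
        · exact hyp k h' h2
      · rw [not_le] at hc
        rw [popRes_some (searchDown_complete_some hit hc
          (fun m h1 h2 => not_lt.mpr (hyp m h1 h2)))]
        rw [chain_eq_some hpl]

theorem popStk (arr : List Int) (t : Nat) :
    popLoop arr (arr.getD t 0) (stkOf arr t) = popRes arr t := by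
  match t with
  | 0 =>
    rw [popRes_none (prevLess_zero arr)]
    rfl
  | t + 1 => exact popChain t (Nat.lt_succ_self t) (fun k h1 h2 => by omega)

theorem set_append_len {α : Type} (xs : List α) (y : α) (ys : List α) (v : α) (t : Nat)
    (h : xs.length = t) : (xs ++ y :: ys).set t v = xs ++ v :: ys := by
  subst h
  induction xs with
  | nil => simp
  | cons x xs ih => simp [ih]

theorem getD_map_range (f : Nat → Int) {j t : Nat} (h : j < t) :
    ((List.range t).map f).getD j 0 = f j := by
  rw [List.getD_eq_getElem?_getD, List.getElem?_map, List.getElem?_range h]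
  rfl

theorem foldInv (arr : List Int) : ∀ t N, t ≤ N →
    (List.range t).foldl (helperStep arr) (List.replicate N 0, ([] : List Nat)) =
      ((List.range t).map (fval arr) ++ List.replicate (N - t) 0, stkOf arr t) := by
  intro t
  induction t with
  | zero => intro N h; simp [stkOf]
  | succ t ih =>
    intro N h
    rw [List.range_succ, List.foldl_append, ih N (by omega)]
    simp only [List.foldl_cons, List.foldl_nil]
    simp only [helperStep]
    rw [popStk]
    have hlen : ((List.range t).map (fval arr)).length = t := by simp
    have hrep : List.replicate (N - t) (0 : Int) = 0 :: List.replicate (N - (t + 1)) 0 := by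
      have : N - t = (N - (t + 1)) + 1 := by omega
      rw [this, List.replicate_succ]
    rcases hpl : prevLess arr t with _ | j
    · rw [popRes_none hpl]
      show ((((List.range t).map (fval arr) ++ List.replicate (N - t) 0).set t
          (((t : Int) + 1) * arr.getD t 0)), [t]) = _
      rw [Prod.mk.injEq]
      refine ⟨?_, ?_⟩
      · rw [hrep, set_append_len _ _ _ _ _ hlen]
        simp [fval_eq_none hpl]
      · rw [stkOf, chain_eq_none hpl]
    · have hj : j < t := searchDown_lt hpl
      rw [popRes_some hpl, chain_cons arr j]
      show ((((List.range t).map (fval arr) ++ List.replicate (N - t) 0).set t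
            (((t : Int) - (j : Int)) * arr.getD t 0 +
              ((List.range t).map (fval arr) ++ List.replicate (N - t) 0).getD j 0)),
          t :: j :: chainTail arr j) = _
      rw [Prod.mk.injEq]
      refine ⟨?_, ?_⟩
      · rw [List.getD_append _ _ _ _ (by omega), getD_map_range _ hj]
        rw [hrep, set_append_len _ _ _ _ _ hlen]
        simp [fval_eq_some hpl]
      · rw [stkOf, chain_eq_some hpl, chain_cons arr j]

theorem helper_eq (arr : List Int) (n : Int) :
    helper arr n = (List.range n.toNat).map (fval arr) := by
  unfold helper
  rw [foldInv arr n.toNat n.toNat (le_refl _)]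
  simp

theorem scan_const (arr : List Int) : ∀ (L : List Nat) (m s : Int),
    (∀ k ∈ L, ¬ arr.getD k 0 < m) →
    L.foldl (scanStep arr) (m, s) = (m, s + m * (L.length : Int)) := by
  intro L
  induction L with
  | nil => intro m s h; simp
  | cons k L ih =>
    intro m s h
    simp only [List.foldl_cons, scanStep]
    rw [if_neg (h k (by simp))]
    rw [ih m (s + m) (fun x hx => h x (by simp [hx]))]
    rw [Prod.mk.injEq]
    refine ⟨rfl, ?_⟩
    simp only [List.length_cons]
    push_cast
    ring

theorem scan_shift (arr : List Int) : ∀ (L : List Nat) (m s : Int),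
    L.foldl (scanStep arr) (m, s) =
      ((L.foldl (scanStep arr) (m, 0)).1, s + (L.foldl (scanStep arr) (m, 0)).2) := by
  intro L
  induction L with
  | nil => intro m s; simp
  | cons k L ih =>
    intro m s
    simp only [List.foldl_cons, scanStep]
    rw [ih (if arr.getD k 0 < m then arr.getD k 0 else m) (s + _),
        ih (if arr.getD k 0 < m then arr.getD k 0 else m) (0 + _)]
    rw [Prod.mk.injEq]
    refine ⟨rfl, ?_⟩
    ring

theorem rev_range_succ (j : Nat) :
    (List.range (j + 1)).reverse = j :: (List.range j).reverse := by
  rw [List.range_succ]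
  simp

theorem minScan_eq (arr : List Int) : ∀ i, minScan arr i = fval arr i := by
  intro i
  induction i using Nat.strong_induction_on with
  | _ i ih =>
    unfold minScan
    rcases hpl : prevLess arr i with _ | j
    · rw [scan_const arr]
      · rw [fval_eq_none hpl]
        simp [mul_comm]
      · intro k hk
        simp only [List.mem_reverse, List.mem_range] at hk
        rcases Nat.lt_succ_iff_lt_or_eq.mp hk with h' | h'
        · exact searchDown_none hpl k h'
        · subst h'; exact lt_irrefl _
    · have hj : j < i := searchDown_lt hpl
      have hsplit : (List.range (i + 1)).reverse =
          ((List.range (i - j)).map (fun x => (j + 1) + x)).reverse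
            ++ (j :: (List.range j).reverse) := by
        have h1 : i + 1 = (j + 1) + (i - j) := by omega
        rw [h1, List.range_add, List.reverse_append, rev_range_succ]
      rw [hsplit, List.foldl_append]
      rw [scan_const arr (((List.range (i - j)).map (fun x => (j + 1) + x)).reverse)
        (arr.getD i 0) 0 (by
        intro k hk
        simp only [List.mem_reverse, List.mem_map, List.mem_range] at hk
        obtain ⟨x, hx, rfl⟩ := hk
        rcases Nat.lt_or_ge (j + 1 + x) i with h' | h'
        · exact searchDown_between hpl _ (by omega) h'
        · have h2 : j + 1 + x = i := by omega
          rw [h2]; exact lt_irrefl _)]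
      simp only [List.foldl_cons, scanStep]
      rw [if_pos (searchDown_some_lt hpl)]
      rw [scan_shift arr ((List.range j).reverse)]
      have hmj : minScan arr j = arr.getD j 0 +
          (((List.range j).reverse).foldl (scanStep arr) (arr.getD j 0, 0)).2 := by
        unfold minScan
        rw [rev_range_succ, List.foldl_cons]
        simp only [scanStep]
        rw [if_neg (lt_irrefl (arr.getD j 0))]
        rw [scan_shift arr ((List.range j).reverse)]
        simp
      rw [fval_eq_some hpl, ← ih j hj, hmj]
      have hlen : ((((List.range (i - j)).map (fun x => (j + 1) + x)).reverse).length : Int)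
          = (i : Int) - (j : Int) := by
        simp
        omega
      rw [hlen]
      ring

-- ===== VERDICT (by name: the statement is the Claim_ definition above) =====
theorem helper_spec : Claim_equal_helper := by
  intro arr n _ _
  unfold Spec_helper helper_alt
  rw [helper_eq]
  have : minScan arr = fval arr := funext (minScan_eq arr)
  rw [this]
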